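-- pv_equiv track=rewrite | github.com/Chunhao-Li/Learning-Python | Course Learning/Homework4/max_increase.py | max_increase_ls
-- ===== SOURCE A (Python) =====
-- def max_increase_ls(seq):
--     '''To make a list of increments'''
--     index = 0
--     increase_ls = []
--     while index < len(seq)-1:
--         l_num = seq[index]
--         h_num = max(seq[index:])
--         m_increase = h_num - l_num
--         increase_ls += [m_increase]
--         index += 1
--     return increase_ls
-- ===== SOURCE B (Python) =====
-- def max_increase_ls(seq):
--     '''Single right-to-left pass tracking the running suffix maximum.'''
--     running = None
--     out = []
--     for x in reversed(seq):
--         if running is None: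
--             running = x
--         else:
--             running = max(running, x)
--             out.append(running - x)
--     out.reverse()
--     return out
-- ===== Notes on version B (the rewrite author's own statement) =====
-- stated objective: faster
-- what changed: Replaced the per-index max(seq[index:]) rescans by one right-to-left pass that maintains the running suffix maximum.
import Mathlib
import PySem

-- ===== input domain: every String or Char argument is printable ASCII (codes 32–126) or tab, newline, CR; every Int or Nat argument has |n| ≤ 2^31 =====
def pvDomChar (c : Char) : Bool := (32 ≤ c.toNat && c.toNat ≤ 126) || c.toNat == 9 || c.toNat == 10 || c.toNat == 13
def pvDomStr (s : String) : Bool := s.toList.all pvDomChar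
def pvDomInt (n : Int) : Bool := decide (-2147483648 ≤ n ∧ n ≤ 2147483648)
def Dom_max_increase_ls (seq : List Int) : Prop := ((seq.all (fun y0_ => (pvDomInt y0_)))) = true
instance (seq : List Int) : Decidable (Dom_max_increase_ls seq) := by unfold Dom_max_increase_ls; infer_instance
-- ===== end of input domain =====

-- B replaces A's quadratic per-index max(seq[index:]) rescans by a single right-to-left
-- pass tracking the running suffix maximum (objective: faster, asymptotic).

-- ===== PORT A =====
-- while index < len(seq)-1: append max(seq[index:]) - seq[index]; index += 1
-- (seq[index] and max(...) are in range/nonempty under the loop guard, so the .getD 0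
-- defaults of the Option-returning primitives are never actually used)
def maxIncAuxA (seq : List Int) (index : Nat) : List Int :=
  if index < seq.length - 1 then
    let l_num := PySem.List.pyGetD seq (index : Int) 0
    let h_num := (PySem.List.max? (PySem.List.slice seq (some (index : Int)) none) (fun y => y)).getD 0
    (h_num - l_num) :: maxIncAuxA seq (index + 1)
  else []
termination_by seq.length - index

def max_increase_ls (seq : List Int) : List Int := maxIncAuxA seq 0

-- ===== PORT B =====
-- for x in reversed(seq): update running suffix max (None until first element), append diff; reverse at the end
def maxIncStepB (st : Option Int × List Int) (x : Int) : Option Int × List Int :=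
  match st with
  | (none, out) => (some x, out)
  | (some r, out) => let r' := max r x; (some r', out ++ [r' - x])

def max_increase_ls_alt (seq : List Int) : List Int :=
  ((seq.reverse.foldl maxIncStepB (none, [])).2).reverse

-- ===== PRECONDITION & SPEC =====
def Spec_max_increase_ls (seq : List Int) (out : List Int) : Prop := out = max_increase_ls_alt seq
instance (seq : List Int) (out : List Int) : Decidable (Spec_max_increase_ls seq out) := by unfold Spec_max_increase_ls; infer_instance

-- ===== CLAIM (what is proved, stated in full; the proofs are below) =====
def Claim_equal_max_increase_ls : Prop := ∀ (seq : List Int), Dom_max_increase_ls seq → Spec_max_increase_ls seq (max_increase_ls seq)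

-- ===== LEMMAS AND PROOFS =====

/-- Reference recursion both ports are reduced to. -/
def gRef : List Int → List Int
  | [] => []
  | [_] => []
  | x :: y :: t => ((y :: t).foldl max x - x) :: gRef (y :: t)

theorem foldl_max_swap (t : List Int) (a b : Int) :
    max (t.foldl max a) b = t.foldl max (max a b) := by
  induction t generalizing a with
  | nil => rfl
  | cons c t ih =>
      simp only [List.foldl_cons]
      rw [ih (max a c), max_right_comm]

theorem gRef_short (l : List Int) (h : l.length ≤ 1) : gRef l = [] := by
  match l with
  | [] => rfl
  | [_] => rfl
  | _ :: _ :: _ => simp at h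

theorem auxA_eq_gRef (seq : List Int) (index : Nat) :
    maxIncAuxA seq index = gRef (seq.drop index) := by
  induction index using (maxIncAuxA.induct seq) with
  | case1 index hlt ih =>
      rw [maxIncAuxA, if_pos hlt]
      have hidx : index < seq.length := by omega
      have hidx1 : index + 1 < seq.length := by omega
      have hdrop : seq.drop index = seq[index] :: seq.drop (index + 1) :=
        List.drop_eq_getElem_cons hidx
      have hdrop1 : seq.drop (index + 1) = seq[index + 1] :: seq.drop (index + 2) :=
        List.drop_eq_getElem_cons hidx1
      have hslice : PySem.List.slice seq (some (index : Int)) none = seq.drop index :=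
        PySem.List.slice_from_natCast seq index
      rw [hslice, hdrop, PySem.List.max?_id_cons]
      have hget : PySem.List.pyGetD seq (index : Int) 0 = seq[index] := by
        rw [PySem.List.pyGetD_natCast, List.getD_eq_getElem seq 0 hidx]
      rw [hget, ih, hdrop1]
      rfl
  | case2 index hge =>
      rw [maxIncAuxA, if_neg hge]
      exact (gRef_short _ (by simp; omega)).symm

theorem foldB_inv (l : List Int) (h : l ≠ []) :
    l.reverse.foldl maxIncStepB (none, []) =
      (some (l.tail.foldl max (l.head h)), (gRef l).reverse) := by
  induction l with
  | nil => exact absurd rfl h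
  | cons x rest ih =>
      cases rest with
      | nil => rfl
      | cons y t =>
          have hr : (y :: t) ≠ [] := by simp
          rw [List.reverse_cons, List.foldl_append, ih hr]
          simp only [List.foldl_cons, List.foldl_nil, maxIncStepB,
            List.head_cons, List.tail_cons]
          have h1 : max (List.foldl max y t) x = List.foldl max (max x y) t := by
            rw [foldl_max_swap, max_comm y x]
          rw [h1, Prod.mk.injEq]
          refine ⟨rfl, ?_⟩
          rw [show gRef (x :: y :: t) = ((y :: t).foldl max x - x) :: gRef (y :: t) from rfl]
          rw [List.reverse_cons, List.foldl_cons]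

theorem altB_eq_gRef (l : List Int) : max_increase_ls_alt l = gRef l := by
  cases l with
  | nil => rfl
  | cons x rest =>
      unfold max_increase_ls_alt
      rw [foldB_inv (x :: rest) (by simp)]
      simp

-- ===== VERDICT (by name: the statement is the Claim_ definition above) =====
theorem max_increase_ls_spec : Claim_equal_max_increase_ls := by
  intro seq _
  unfold Spec_max_increase_ls max_increase_ls
  rw [auxA_eq_gRef seq 0, List.drop_zero, altB_eq_gRef]
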